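-- pv_equiv track=rewrite | github.com/hsuchengmath/tutorabc_dcgs_api_v1 | collection_stage_util/collect_mat_data.py | calculate_weight_for_new_mat
-- ===== SOURCE A (Python) =====
-- def calculate_weight_for_new_mat(new_mat_list, user2history_mat):
--     user_list = list(user2history_mat.keys())
--     weight_of_new_mat_list = list()
--     for i in range(len(new_mat_list)):
--         weight = 0
--         mat = new_mat_list[i]
--         for uid in user_list:
--             if mat in list(set(user2history_mat[uid])):
--                 weight +=1
--         weight_of_new_mat_list.append(weight)
--     return weight_of_new_mat_list
-- ===== SOURCE B (Python) =====
-- def calculate_weight_for_new_mat(new_mat_list, user2history_mat):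
--     count = {}
--     for history in user2history_mat.values():
--         for m in set(history):
--             count[m] = count.get(m, 0) + 1
--     return [count.get(mat, 0) for mat in new_mat_list]
-- ===== Notes on version B (the rewrite author's own statement) =====
-- stated objective: faster
-- what changed: Instead of rescanning every user (rebuilding set(history) each time) for each mat, B makes one pass over user2history_mat building a per-mat user-frequency table and then answers each mat by a dictionary lookup; the Lean Pre_ only requires the association list to have distinct keys, i.e. to be a valid encoding of a Python dict.
import Mathlib
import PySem

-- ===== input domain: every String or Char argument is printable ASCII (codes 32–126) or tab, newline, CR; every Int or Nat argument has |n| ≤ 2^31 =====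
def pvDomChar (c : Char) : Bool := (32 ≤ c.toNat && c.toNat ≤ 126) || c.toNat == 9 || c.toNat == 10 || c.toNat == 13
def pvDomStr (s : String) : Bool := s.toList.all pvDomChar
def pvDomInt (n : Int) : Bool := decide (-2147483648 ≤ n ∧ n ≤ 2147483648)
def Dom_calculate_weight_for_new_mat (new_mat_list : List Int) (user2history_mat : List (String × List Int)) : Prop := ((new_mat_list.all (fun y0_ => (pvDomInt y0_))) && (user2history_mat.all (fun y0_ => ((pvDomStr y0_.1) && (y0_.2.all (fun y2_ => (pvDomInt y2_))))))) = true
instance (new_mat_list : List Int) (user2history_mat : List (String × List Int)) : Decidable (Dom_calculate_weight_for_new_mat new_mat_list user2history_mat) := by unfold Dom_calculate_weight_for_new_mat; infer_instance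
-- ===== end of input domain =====

-- B replaces A's per-mat rescan of all users by one pass that builds a per-mat
-- user-frequency table, then a lookup per mat (objective: faster).

-- ===== PORT A =====
def calculate_weight_for_new_mat (new_mat_list : List Int) (user2history_mat : List (String × List Int)) : List Int :=
  let user_list := user2history_mat.map Prod.fst
  (PySem.List.pyRange 0 (new_mat_list.length : Int) 1).foldl (fun acc i =>
    let mat := PySem.List.pyGetD new_mat_list i 0
    let weight := user_list.foldl (fun w uid =>
      if mat ∈ PySem.Set.ofList ((PySem.Dict.mk user2history_mat).getD uid []) then w + 1 else w) (0 : Int)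
    acc ++ [weight]) []

-- ===== PORT B =====
def calculate_weight_for_new_mat_alt (new_mat_list : List Int) (user2history_mat : List (String × List Int)) : List Int :=
  let count : PySem.Dict Int Int :=
    user2history_mat.foldl (fun d p =>
      (PySem.Set.ofList p.2).foldl (fun d m => d.modify m 0 (· + 1)) d) PySem.Dict.empty
  new_mat_list.map (fun mat => count.getD mat 0)

-- ===== PRECONDITION & SPEC =====
-- Pre_ requires the association list to have pairwise-distinct keys, i.e. to be a valid
-- encoding of a Python dict (a Python dict cannot hold duplicate keys, so no Python input
-- is excluded); on duplicate keys the encoding's meaning is undefined.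
def Pre_calculate_weight_for_new_mat (new_mat_list : List Int) (user2history_mat : List (String × List Int)) : Prop :=
  (user2history_mat.map Prod.fst).Nodup
instance (new_mat_list : List Int) (user2history_mat : List (String × List Int)) : Decidable (Pre_calculate_weight_for_new_mat new_mat_list user2history_mat) := by unfold Pre_calculate_weight_for_new_mat; infer_instance

def pvWitness_calculate_weight_for_new_mat : List Int × (List (String × List Int)) :=
  ([1, 2, 2], [("u1", [1, 3, 1]), ("u2", [2])])

def Spec_calculate_weight_for_new_mat (new_mat_list : List Int) (user2history_mat : List (String × List Int)) (out : List Int) : Prop := out = calculate_weight_for_new_mat_alt new_mat_list user2history_mat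
instance (new_mat_list : List Int) (user2history_mat : List (String × List Int)) (out : List Int) : Decidable (Spec_calculate_weight_for_new_mat new_mat_list user2history_mat out) := by unfold Spec_calculate_weight_for_new_mat; infer_instance

-- ===== CLAIM (what is proved, stated in full; the proofs are below) =====
def Claim_equal_calculate_weight_for_new_mat : Prop := ∀ (new_mat_list : List Int) (user2history_mat : List (String × List Int)), Dom_calculate_weight_for_new_mat new_mat_list user2history_mat → Pre_calculate_weight_for_new_mat new_mat_list user2history_mat → Spec_calculate_weight_for_new_mat new_mat_list user2history_mat (calculate_weight_for_new_mat new_mat_list user2history_mat)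

-- ===== LEMMAS AND PROOFS =====

-- A's outer loop over range(len(new_mat_list)) is a map of the per-mat weight.
theorem pv_outer (nm : List Int) (g : Int → Int) :
    (PySem.List.pyRange 0 (nm.length : Int) 1).foldl
      (fun acc i => acc ++ [g (PySem.List.pyGetD nm i 0)]) []
    = nm.map g :=
  (PySem.List.foldl_pyRange_zero_pyGetD' nm 0 (fun acc x => acc ++ [g x]) []).trans
    ((PySem.List.foldl_append_singleton_eq_map g nm []).trans (List.nil_append _))

-- A's inner loop over the key list, looking each key up in the full dict, equals
-- a single fold over the pairs themselves (needs distinct keys).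
theorem pv_inner_eq (mat : Int) : ∀ (u : List (String × List Int)) (w : Int),
    (u.map Prod.fst).Nodup →
    (u.map Prod.fst).foldl (fun w uid =>
      if mat ∈ PySem.Set.ofList ((PySem.Dict.mk u).getD uid []) then w + 1 else w) w
    = u.foldl (fun w p => if mat ∈ PySem.Set.ofList p.2 then w + 1 else w) w := by
  intro u
  induction u with
  | nil => intro w _; rfl
  | cons p t ih =>
    intro w hnd
    obtain ⟨k, h⟩ := p
    simp only [List.map_cons, List.nodup_cons] at hnd
    obtain ⟨hk, hndt⟩ := hnd
    simp only [List.map_cons, List.foldl_cons]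
    have hhead : (PySem.Dict.mk ((k, h) :: t)).getD k [] = h := by
      simp [PySem.Dict.getD_eq_get?_getD, PySem.Dict.get?_mk_cons]
    rw [hhead]
    have hcongr : (t.map Prod.fst).foldl (fun w uid =>
        if mat ∈ PySem.Set.ofList ((PySem.Dict.mk ((k, h) :: t)).getD uid []) then w + 1 else w)
        (if mat ∈ PySem.Set.ofList h then w + 1 else w)
      = (t.map Prod.fst).foldl (fun w uid =>
        if mat ∈ PySem.Set.ofList ((PySem.Dict.mk t).getD uid []) then w + 1 else w)
        (if mat ∈ PySem.Set.ofList h then w + 1 else w) := by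
      apply PySem.List.foldl_congr_mem
      intro acc uid hmem
      have hne : (k = uid) → False := fun he => hk (he ▸ hmem)
      have hlook : (PySem.Dict.mk ((k, h) :: t)).getD uid [] = (PySem.Dict.mk t).getD uid [] := by
        simp only [PySem.Dict.getD_eq_get?_getD, PySem.Dict.get?_mk_cons, beq_iff_eq]
        rw [if_neg hne]
      rw [hlook]
    rw [hcongr, ih _ hndt]

-- B's table-building fold: the count for a mat is the starting count plus the
-- number of pairs whose (deduplicated) history contains the mat.
theorem pv_count_getD (mat : Int) : ∀ (u : List (String × List Int)) (d : PySem.Dict Int Int),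
    (u.foldl (fun d p => (PySem.Set.ofList p.2).foldl (fun d m => d.modify m 0 (· + 1)) d) d).getD mat 0
    = u.foldl (fun w p => if mat ∈ PySem.Set.ofList p.2 then w + 1 else w) (d.getD mat 0) := by
  intro u
  induction u with
  | nil => intro d; rfl
  | cons p t ih =>
    intro d
    simp only [List.foldl_cons]
    rw [ih]
    congr 1
    rw [PySem.Dict.getD_foldl_modify_add_one]
    by_cases hm : mat ∈ PySem.Set.ofList p.2
    · have h1 : List.count mat (PySem.Set.ofList p.2) = 1 :=
        List.count_eq_one_of_mem (PySem.Set.nodup_ofList p.2) hm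
      rw [h1]; simp [hm]
    · have h0 : List.count mat (PySem.Set.ofList p.2) = 0 :=
        List.count_eq_zero_of_not_mem hm
      rw [h0]; simp [hm]

-- ===== VERDICT (by name: the statement is the Claim_ definition above) =====
theorem calculate_weight_for_new_mat_spec : Claim_equal_calculate_weight_for_new_mat := by
  intro nm u _hdom hpre
  unfold Spec_calculate_weight_for_new_mat calculate_weight_for_new_mat calculate_weight_for_new_mat_alt
  refine Eq.trans (pv_outer nm (fun mat => (u.map Prod.fst).foldl (fun w uid =>
    if mat ∈ PySem.Set.ofList ((PySem.Dict.mk u).getD uid []) then w + 1 else w) 0)) ?_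
  show nm.map (fun mat => (u.map Prod.fst).foldl (fun w uid =>
      if mat ∈ PySem.Set.ofList ((PySem.Dict.mk u).getD uid []) then w + 1 else w) (0 : Int))
    = nm.map (fun mat =>
    (u.foldl (fun d p => (PySem.Set.ofList p.2).foldl (fun d m => d.modify m 0 (· + 1)) d)
      PySem.Dict.empty).getD mat 0)
  apply List.map_congr_left
  intro mat _
  rw [pv_inner_eq mat u 0 hpre, pv_count_getD]
  rfl
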